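-- pv_equiv track=rewrite | github.com/alexandraback/datacollection | solutions_5658571765186560_0/Python/avocados/ominous_omino.py | check_if_piece_exceeds_this_dimension
-- ===== SOURCE A (Python) =====
-- def check_if_piece_exceeds_this_dimension(dimension, omino_size):
--     if omino_size <= 2:
--         return False
--
--     for i in range(1, omino_size+1):
--         left = i
--         right = omino_size + 1 - i
--         if min(left, right) > dimension:
--             return True
--     return False
-- ===== SOURCE B (Python) =====
-- def check_if_piece_exceeds_this_dimension(dimension, omino_size):
--     # Closed form: the best split's minimum dimension is ceil(omino_size/2) = (omino_size+1)//2.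
--     return omino_size > 2 and (omino_size + 1) // 2 > dimension
-- ===== Notes on version B (the rewrite author's own statement) =====
-- stated objective: faster
-- what changed: Replaced the linear scan over all splits by the closed form (omino_size+1)//2 > dimension, since the maximal minimum over splits i,(omino_size+1-i) is ceil(omino_size/2).
import Mathlib
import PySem

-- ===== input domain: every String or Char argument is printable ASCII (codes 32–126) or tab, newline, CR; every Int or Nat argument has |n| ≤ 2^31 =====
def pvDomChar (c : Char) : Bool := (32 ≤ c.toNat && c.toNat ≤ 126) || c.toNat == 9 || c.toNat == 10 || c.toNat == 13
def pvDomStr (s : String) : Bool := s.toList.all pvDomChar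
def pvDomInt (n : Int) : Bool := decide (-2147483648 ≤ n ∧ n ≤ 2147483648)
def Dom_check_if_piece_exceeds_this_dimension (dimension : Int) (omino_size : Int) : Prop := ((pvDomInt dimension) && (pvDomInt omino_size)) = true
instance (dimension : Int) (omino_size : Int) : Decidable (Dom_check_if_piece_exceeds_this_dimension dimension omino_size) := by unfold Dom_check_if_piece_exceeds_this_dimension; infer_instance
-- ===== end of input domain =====

-- B replaces A's linear scan over all splits by the O(1) closed form (omino_size+1)//2 > dimension (objective: faster).

-- ===== PORT A =====
-- the for-loop of A: try each split point i = 1, 2, … in order (fuel = number of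
-- remaining iterations of range(1, omino_size+1)), early-return True on the first hit
def pvLoopA (dimension omino_size : Int) : Nat → Int → Bool
  | 0, _ => false
  | fuel + 1, i =>
    if min i (omino_size + 1 - i) > dimension then true
    else pvLoopA dimension omino_size fuel (i + 1)

def check_if_piece_exceeds_this_dimension (dimension : Int) (omino_size : Int) : Bool :=
  if omino_size ≤ 2 then false
  else pvLoopA dimension omino_size (omino_size + 1 - 1).toNat 1

-- ===== PORT B =====
def check_if_piece_exceeds_this_dimension_alt (dimension : Int) (omino_size : Int) : Bool :=
  omino_size > 2 && PySem.Int.floordiv (omino_size + 1) 2 > dimension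

-- ===== PRECONDITION & SPEC =====
def Spec_check_if_piece_exceeds_this_dimension (dimension : Int) (omino_size : Int) (out : Bool) : Prop := out = check_if_piece_exceeds_this_dimension_alt dimension omino_size
instance (dimension : Int) (omino_size : Int) (out : Bool) : Decidable (Spec_check_if_piece_exceeds_this_dimension dimension omino_size out) := by unfold Spec_check_if_piece_exceeds_this_dimension; infer_instance

-- ===== CLAIM (what is proved, stated in full; the proofs are below) =====
def Claim_equal_check_if_piece_exceeds_this_dimension : Prop := ∀ (dimension : Int) (omino_size : Int), Dom_check_if_piece_exceeds_this_dimension dimension omino_size → Spec_check_if_piece_exceeds_this_dimension dimension omino_size (check_if_piece_exceeds_this_dimension dimension omino_size)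

-- ===== LEMMAS AND PROOFS =====
theorem pvLoopA_eq_any (dimension omino_size : Int) (fuel : Nat) (i : Int) :
    pvLoopA dimension omino_size fuel i
      = (PySem.List.pyRange i (i + fuel) 1).any (fun j => min j (omino_size + 1 - j) > dimension) := by
  induction fuel generalizing i with
  | zero => simp [pvLoopA]
  | succ fuel ih =>
    rw [PySem.List.pyRange_one_cons (by omega : i < i + (fuel + 1 : Nat))]
    simp only [pvLoopA, ih, List.any_cons]
    have : i + 1 + (fuel : Int) = i + ((fuel : Nat) + 1 : Nat) := by push_cast; ring
    rw [this]
    split_ifs with h <;> simp [h]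

-- ===== VERDICT (by name: the statement is the Claim_ definition above) =====
theorem check_if_piece_exceeds_this_dimension_spec : Claim_equal_check_if_piece_exceeds_this_dimension := by
  intro d s _
  unfold Spec_check_if_piece_exceeds_this_dimension
  unfold check_if_piece_exceeds_this_dimension check_if_piece_exceeds_this_dimension_alt
  by_cases hs : s ≤ 2
  · simp [hs]
  · rw [if_neg hs, pvLoopA_eq_any]
    have hr : (1 : Int) + ((s + 1 - 1).toNat : Int) = s + 1 := by omega
    rw [hr]
    have hf : PySem.Int.floordiv (s + 1) 2 = (s + 1) / 2 := by
      simp [PySem.Int.floordiv, Int.fdiv_eq_ediv]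
    rw [Bool.eq_iff_iff]
    simp only [List.any_eq_true, PySem.List.mem_pyRange_one, Bool.and_eq_true,
      decide_eq_true_eq, hf]
    constructor
    · rintro ⟨i, ⟨h1, h2⟩, h3⟩
      refine ⟨by omega, ?_⟩
      have : min i (s + 1 - i) ≤ (s + 1) / 2 := by
        rcases le_total i (s + 1 - i) with h | h
        · rw [min_eq_left h]; omega
        · rw [min_eq_right h]; omega
      omega
    · rintro ⟨-, h⟩
      refine ⟨(s + 1) / 2, ⟨by omega, by omega⟩, ?_⟩
      have : min ((s + 1) / 2) (s + 1 - (s + 1) / 2) = (s + 1) / 2 := min_eq_left (by omega)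
      omega
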